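-- pv_equiv track=rewrite | github.com/monkey265/VHDL-Diagramer | vhdl_diagramer.py | build_grid_occupancy
-- ===== SOURCE A (Python) =====
-- from typing import List, Dict, Tuple, Optional, Set
--
-- GRID_STEP = 20  # Base grid for pathfinding
--
-- def build_grid_occupancy(blocks: List[Tuple[int,int,int,int]],
--                         xmin: int, xmax: int, ymin: int, ymax: int) -> Dict[Tuple[int,int], bool]:
--     """Build grid of which cells are blocked (True = blocked, False = free)."""
--     occupancy = {}
--     margin = 30  # Larger margin to ensure no clipping
--
--     for gx in range(xmin, xmax + 1, GRID_STEP):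
--         for gy in range(ymin, ymax + 1, GRID_STEP):
--             cell = (gx, gy)
--             blocked = False
--
--             # Check if this grid cell center is inside any expanded block
--             for (bx, by, bw, bh) in blocks:
--                 # Expand block by margin
--                 if (bx - margin) <= gx <= (bx + bw + margin) and \
--                    (by - margin) <= gy <= (by + bh + margin):
--                     blocked = True
--                     break
--
--             occupancy[cell] = blocked
--
--     return occupancy
-- ===== SOURCE B (Python) =====
-- from typing import List, Dict, Tuple
--
-- GRID_STEP = 20  # Base grid for pathfinding
--
-- def build_grid_occupancy(blocks: List[Tuple[int,int,int,int]],
--                         xmin: int, xmax: int, ymin: int, ymax: int) -> Dict[Tuple[int,int], bool]: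
--     """Mark all cells free, then stamp each expanded block's bounding box onto the grid."""
--     margin = 30
--     occupancy = {(gx, gy): False
--                  for gx in range(xmin, xmax + 1, GRID_STEP)
--                  for gy in range(ymin, ymax + 1, GRID_STEP)}
--     for (bx, by, bw, bh) in blocks:
--         # first grid coordinate >= bx - margin (ceil division), clamped to the grid start
--         gx0 = xmin + GRID_STEP * max(0, -((xmin - (bx - margin)) // GRID_STEP))
--         gx1 = min(xmax, bx + bw + margin)
--         gy0 = ymin + GRID_STEP * max(0, -((ymin - (by - margin)) // GRID_STEP))
--         gy1 = min(ymax, by + bh + margin)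
--         for gx in range(gx0, gx1 + 1, GRID_STEP):
--             for gy in range(gy0, gy1 + 1, GRID_STEP):
--                 occupancy[(gx, gy)] = True
--     return occupancy
-- ===== Notes on version B (the rewrite author's own statement) =====
-- stated objective: alternative
-- what changed: Instead of testing every grid cell against every block with an early-exit inner scan, B initialises every cell free and then stamps each block's margin-expanded bounding box directly onto the grid; this trades A's per-cell block scan for per-block area writes (better when block areas are small relative to the grid, not faster when many large blocks overlap).
import Mathlib
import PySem

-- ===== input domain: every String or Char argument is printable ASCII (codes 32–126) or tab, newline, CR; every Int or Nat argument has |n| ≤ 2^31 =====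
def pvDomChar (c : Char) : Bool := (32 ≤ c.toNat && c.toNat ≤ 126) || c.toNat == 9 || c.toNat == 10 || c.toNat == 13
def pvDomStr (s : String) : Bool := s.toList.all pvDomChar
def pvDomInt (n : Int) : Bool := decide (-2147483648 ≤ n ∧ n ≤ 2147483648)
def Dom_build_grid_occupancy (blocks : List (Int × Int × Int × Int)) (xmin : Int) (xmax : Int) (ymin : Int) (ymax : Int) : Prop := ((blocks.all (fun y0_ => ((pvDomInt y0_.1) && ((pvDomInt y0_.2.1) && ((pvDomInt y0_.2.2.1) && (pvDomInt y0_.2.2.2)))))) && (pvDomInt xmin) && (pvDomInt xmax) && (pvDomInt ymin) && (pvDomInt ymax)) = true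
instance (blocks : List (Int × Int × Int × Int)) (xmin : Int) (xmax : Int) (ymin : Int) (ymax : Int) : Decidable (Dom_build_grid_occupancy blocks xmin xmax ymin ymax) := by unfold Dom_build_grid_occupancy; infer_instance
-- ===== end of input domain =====

-- ===== PORT A =====
-- B stamps each block's margin-expanded bounding box onto a grid initialised all-free,
-- instead of scanning all blocks for every grid cell (objective: alternative algorithm).
-- GRID_STEP = 20 and margin = 30 are inlined as literals.
-- the inner 'for (bx, by, bw, bh) in blocks: ... break' flag loop of A:
def pvBlockedA (blocks : List (Int × Int × Int × Int)) (gx gy : Int) : Bool :=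
  match blocks with
  | [] => false
  | (bx, by_, bw, bh) :: rest =>
    if (bx - 30 ≤ gx ∧ gx ≤ bx + bw + 30) ∧ (by_ - 30 ≤ gy ∧ gy ≤ by_ + bh + 30) then true
    else pvBlockedA rest gx gy

-- the returned dict {(gx, gy): blocked} rendered as the flattened association list
def build_grid_occupancy (blocks : List (Int × Int × Int × Int)) (xmin : Int) (xmax : Int) (ymin : Int) (ymax : Int) : List (Int × Int × Bool) :=
  (((PySem.List.pyRange xmin (xmax + 1) 20).foldl (fun occ gx =>
      (PySem.List.pyRange ymin (ymax + 1) 20).foldl (fun occ gy =>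
        occ.insert (gx, gy) (pvBlockedA blocks gx gy)) occ)
    (PySem.Dict.empty : PySem.Dict (Int × Int) Bool)).items).map (fun p => (p.1.1, p.1.2, p.2))

-- ===== PORT B =====
-- the Python locals gx0/gx1/gy0/gy1 (each used once) are inlined into the two ranges
def build_grid_occupancy_alt (blocks : List (Int × Int × Int × Int)) (xmin : Int) (xmax : Int) (ymin : Int) (ymax : Int) : List (Int × Int × Bool) :=
  ((blocks.foldl (fun occ b =>
      (PySem.List.pyRange (xmin + 20 * max 0 (-(PySem.Int.floordiv (xmin - (b.1 - 30)) 20)))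
          (min xmax (b.1 + b.2.2.1 + 30) + 1) 20).foldl (fun occ gx =>
        (PySem.List.pyRange (ymin + 20 * max 0 (-(PySem.Int.floordiv (ymin - (b.2.1 - 30)) 20)))
            (min ymax (b.2.1 + b.2.2.2 + 30) + 1) 20).foldl (fun occ gy =>
          occ.insert (gx, gy) true) occ) occ)
    ((PySem.List.pyRange xmin (xmax + 1) 20).foldl (fun occ gx =>
      (PySem.List.pyRange ymin (ymax + 1) 20).foldl (fun occ gy =>
        occ.insert (gx, gy) false) occ)
      (PySem.Dict.empty : PySem.Dict (Int × Int) Bool))).items).map (fun p => (p.1.1, p.1.2, p.2))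

-- ===== PRECONDITION & SPEC =====
def Spec_build_grid_occupancy (blocks : List (Int × Int × Int × Int)) (xmin : Int) (xmax : Int) (ymin : Int) (ymax : Int) (out : List (Int × Int × Bool)) : Prop := out = build_grid_occupancy_alt blocks xmin xmax ymin ymax
instance (blocks : List (Int × Int × Int × Int)) (xmin : Int) (xmax : Int) (ymin : Int) (ymax : Int) (out : List (Int × Int × Bool)) : Decidable (Spec_build_grid_occupancy blocks xmin xmax ymin ymax out) := by unfold Spec_build_grid_occupancy; infer_instance

-- ===== CLAIM (what is proved, stated in full; the proofs are below) =====
def Claim_equal_build_grid_occupancy : Prop := ∀ (blocks : List (Int × Int × Int × Int)) (xmin : Int) (xmax : Int) (ymin : Int) (ymax : Int), Dom_build_grid_occupancy blocks xmin xmax ymin ymax → Spec_build_grid_occupancy blocks xmin xmax ymin ymax (build_grid_occupancy blocks xmin xmax ymin ymax)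


-- ===== LEMMAS AND PROOFS =====

-- the grid-cell list (gx outer, gy inner) and the cell list a block's stamp touches
def pvCells (xmin xmax ymin ymax : Int) : List (Int × Int) :=
  (PySem.List.pyRange xmin (xmax + 1) 20).flatMap (fun gx =>
    (PySem.List.pyRange ymin (ymax + 1) 20).map (fun gy => (gx, gy)))

def pvStamp (xmin xmax ymin ymax : Int) (b : Int × Int × Int × Int) : List (Int × Int) :=
  (PySem.List.pyRange (xmin + 20 * max 0 (-(PySem.Int.floordiv (xmin - (b.1 - 30)) 20)))
      (min xmax (b.1 + b.2.2.1 + 30) + 1) 20).flatMap (fun gx =>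
    (PySem.List.pyRange (ymin + 20 * max 0 (-(PySem.Int.floordiv (ymin - (b.2.1 - 30)) 20)))
      (min ymax (b.2.1 + b.2.2.2 + 30) + 1) 20).map (fun gy => (gx, gy)))

lemma pvNodupRange (a b : Int) : (PySem.List.pyRange a b 20).Nodup := by
  rw [PySem.List.pyRange_of_pos a b (by norm_num)]
  refine List.Nodup.map ?_ List.nodup_range
  intro k l h
  simp only [] at h
  omega

-- building a dict by a nested loop over distinct coordinates appends all the cell entries
lemma pvNested (ys : List Int) (f : Int → Int → Bool) (xs : List Int) :
    ∀ (d : PySem.Dict (Int × Int) Bool), xs.Nodup → ys.Nodup →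
      (∀ p ∈ d.items, p.1.1 ∉ xs) →
      (xs.foldl (fun d gx => ys.foldl (fun d gy => d.insert (gx, gy) (f gx gy)) d) d).items
        = d.items ++ xs.flatMap (fun gx => ys.map (fun gy => ((gx, gy), f gx gy))) := by
  induction xs with
  | nil => intro d _ _ _; simp
  | cons gx xs ih =>
    intro d hxs hys hd
    have hfresh : ∀ gy ∈ ys, d.contains ((gx, gy) : Int × Int) = false := by
      intro gy _
      rw [PySem.Dict.contains_eq_decide_mem_keys]
      simp only [decide_eq_false_iff_not, PySem.Dict.keys, List.mem_map]
      rintro ⟨p, hp, hpk⟩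
      exact hd p hp (by rw [hpk]; exact List.mem_cons_self ..)
    have hnod : (ys.map (fun gy => ((gx, gy) : Int × Int))).Nodup := by
      refine List.Nodup.map ?_ hys
      intro a b h
      injection h
    have hinner := PySem.Dict.items_foldl_insert_fresh ys
      (fun gy => ((gx, gy) : Int × Int)) (fun gy => f gx gy) d hfresh hnod
    simp only [List.foldl_cons]
    rw [ih _ hxs.of_cons hys ?_, hinner]
    · simp [List.append_assoc]
    · intro p hp
      rw [hinner] at hp
      rcases List.mem_append.mp hp with h | h
      · exact fun hmem => hd p h (List.mem_cons_of_mem _ hmem)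
      · rcases List.mem_map.mp h with ⟨gy, _, rfl⟩
        exact fun hmem => (List.nodup_cons.mp hxs).1 hmem

-- inserting True at an existing key only flips that cell's value
lemma pvInsertShape (cells : List (Int × Int)) (f : Int × Int → Bool) (k : Int × Int)
    (hk : k ∈ cells) :
    (PySem.Dict.mk (cells.map (fun c => (c, f c)))).insert k true
      = PySem.Dict.mk (cells.map (fun c => (c, f c || decide (c = k)))) := by
  have hcon : (PySem.Dict.mk (cells.map (fun c => (c, f c)))).contains k = true := by
    rw [PySem.Dict.contains_eq_decide_mem_keys]
    simp only [decide_eq_true_eq, PySem.Dict.keys, List.map_map]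
    exact List.mem_map.mpr ⟨k, hk, rfl⟩
  apply PySem.Dict.ext
  rw [PySem.Dict.items_insert_of_contains _ _ hcon]
  simp only [List.map_map]
  refine List.map_congr_left ?_
  intro c _
  by_cases h : c = k <;> simp [h]

-- a fold of True-inserts at keys drawn from the cells marks exactly those keys
lemma pvStampFold (cells : List (Int × Int)) (L : List (Int × Int)) :
    ∀ (f : Int × Int → Bool), (∀ k ∈ L, k ∈ cells) →
      L.foldl (fun d k => d.insert k true) (PySem.Dict.mk (cells.map (fun c => (c, f c))))
        = PySem.Dict.mk (cells.map (fun c => (c, f c || decide (c ∈ L)))) := by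
  induction L with
  | nil => intro f _; simp
  | cons k L ih =>
    intro f hL
    rw [List.foldl_cons, pvInsertShape cells f k (hL k (List.mem_cons_self ..)),
      ih _ (fun k' hk' => hL k' (List.mem_cons_of_mem _ hk'))]
    apply PySem.Dict.ext
    refine List.map_congr_left ?_
    intro c _
    by_cases h1 : c = k <;> by_cases h2 : c ∈ L <;> simp [h1, h2]

-- the nested stamping loops of one block are a flat fold over its stamped cell list
lemma pvFoldFlat (xs ys : List Int) (d : PySem.Dict (Int × Int) Bool) :
    xs.foldl (fun d gx => ys.foldl (fun d gy => d.insert (gx, gy) true) d) d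
      = (xs.flatMap (fun gx => ys.map (fun gy => ((gx, gy) : Int × Int)))).foldl
          (fun d k => d.insert k true) d := by
  rw [List.foldl_flatMap]
  refine PySem.List.foldl_congr_mem _ _ _ _ ?_
  intro acc gx _
  rw [List.foldl_map]

-- the whole stamping phase is a flat fold over all blocks' stamped cells
lemma pvStampLoop (blocks : List (Int × Int × Int × Int)) (xmin xmax ymin ymax : Int)
    (d : PySem.Dict (Int × Int) Bool) :
    blocks.foldl (fun occ b =>
      (PySem.List.pyRange (xmin + 20 * max 0 (-(PySem.Int.floordiv (xmin - (b.1 - 30)) 20)))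
          (min xmax (b.1 + b.2.2.1 + 30) + 1) 20).foldl (fun occ gx =>
        (PySem.List.pyRange (ymin + 20 * max 0 (-(PySem.Int.floordiv (ymin - (b.2.1 - 30)) 20)))
            (min ymax (b.2.1 + b.2.2.2 + 30) + 1) 20).foldl (fun occ gy =>
          occ.insert (gx, gy) true) occ) occ) d
      = (blocks.flatMap (pvStamp xmin xmax ymin ymax)).foldl (fun d k => d.insert k true) d := by
  induction blocks generalizing d with
  | nil => simp
  | cons b bs ih =>
    rw [List.foldl_cons, List.flatMap_cons, List.foldl_append, ih, pvFoldFlat]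
    rfl

-- one stamped axis range, read on an aligned grid coordinate, is exactly A's interval test
lemma pvAxis (lo hi bx bw gx : Int) (h1 : lo ≤ gx) (h3 : (20:Int) ∣ gx - lo) :
    gx ∈ PySem.List.pyRange (lo + 20 * max 0 (-(PySem.Int.floordiv (lo - (bx - 30)) 20)))
        (min hi (bx + bw + 30) + 1) 20
      ↔ gx ≤ hi ∧ bx - 30 ≤ gx ∧ gx ≤ bx + bw + 30 := by
  rw [PySem.List.mem_pyRange_iff_of_pos (by norm_num)]
  have hq := PySem.Int.floordiv_mul_add_mod (lo - (bx - 30)) 20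
  have hm1 := PySem.Int.mod_nonneg (lo - (bx - 30)) (b := 20) (by norm_num)
  have hm2 := PySem.Int.mod_lt (lo - (bx - 30)) (b := 20) (by norm_num)
  omega

-- every stamped axis value lies on the grid axis
lemma pvAxisSub (lo hi bx bw gx : Int)
    (h : gx ∈ PySem.List.pyRange (lo + 20 * max 0 (-(PySem.Int.floordiv (lo - (bx - 30)) 20)))
        (min hi (bx + bw + 30) + 1) 20) :
    gx ∈ PySem.List.pyRange lo (hi + 1) 20 := by
  rw [PySem.List.mem_pyRange_iff_of_pos (by norm_num)] at h ⊢
  omega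

lemma pvMemCells (xmin xmax ymin ymax : Int) (c : Int × Int) :
    c ∈ pvCells xmin xmax ymin ymax
      ↔ c.1 ∈ PySem.List.pyRange xmin (xmax + 1) 20
        ∧ c.2 ∈ PySem.List.pyRange ymin (ymax + 1) 20 := by
  unfold pvCells
  simp only [List.mem_flatMap, List.mem_map]
  constructor
  · rintro ⟨gx, hgx, gy, hgy, rfl⟩; exact ⟨hgx, hgy⟩
  · rintro ⟨hx, hy⟩; exact ⟨c.1, hx, c.2, hy, rfl⟩

lemma pvMemStamp (xmin xmax ymin ymax : Int) (b : Int × Int × Int × Int) (c : Int × Int) :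
    c ∈ pvStamp xmin xmax ymin ymax b
      ↔ c.1 ∈ PySem.List.pyRange (xmin + 20 * max 0 (-(PySem.Int.floordiv (xmin - (b.1 - 30)) 20)))
            (min xmax (b.1 + b.2.2.1 + 30) + 1) 20
        ∧ c.2 ∈ PySem.List.pyRange (ymin + 20 * max 0 (-(PySem.Int.floordiv (ymin - (b.2.1 - 30)) 20)))
            (min ymax (b.2.1 + b.2.2.2 + 30) + 1) 20 := by
  unfold pvStamp
  simp only [List.mem_flatMap, List.mem_map]
  constructor
  · rintro ⟨gx, hgx, gy, hgy, rfl⟩; exact ⟨hgx, hgy⟩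
  · rintro ⟨hx, hy⟩; exact ⟨c.1, hx, c.2, hy, rfl⟩

lemma pvStampSubCells (blocks : List (Int × Int × Int × Int)) (xmin xmax ymin ymax : Int) :
    ∀ c ∈ blocks.flatMap (pvStamp xmin xmax ymin ymax), c ∈ pvCells xmin xmax ymin ymax := by
  intro c hc
  rcases List.mem_flatMap.mp hc with ⟨b, _, hcb⟩
  rcases (pvMemStamp xmin xmax ymin ymax b c).mp hcb with ⟨hx, hy⟩
  exact (pvMemCells xmin xmax ymin ymax c).mpr ⟨pvAxisSub _ _ _ _ _ hx, pvAxisSub _ _ _ _ _ hy⟩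

-- A's break-loop is an 'any' over the blocks
lemma pvBlockedA_eq_any (blocks : List (Int × Int × Int × Int)) (gx gy : Int) :
    pvBlockedA blocks gx gy
      = blocks.any (fun b => decide ((b.1 - 30 ≤ gx ∧ gx ≤ b.1 + b.2.2.1 + 30)
          ∧ (b.2.1 - 30 ≤ gy ∧ gy ≤ b.2.1 + b.2.2.2 + 30))) := by
  induction blocks with
  | nil => rfl
  | cons b bs ih =>
    obtain ⟨bx, by_, bw, bh⟩ := b
    simp only [pvBlockedA, List.any_cons, ← ih]
    by_cases h : ((bx - 30 ≤ gx ∧ gx ≤ bx + bw + 30) ∧ by_ - 30 ≤ gy ∧ gy ≤ by_ + bh + 30)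
    · simp [h]
    · rw [if_neg h, decide_eq_false h, Bool.false_or]

-- for a grid cell: membership in some block's stamp = A's blocked test
lemma pvCellEq (blocks : List (Int × Int × Int × Int)) (xmin xmax ymin ymax : Int)
    (c : Int × Int) (hc : c ∈ pvCells xmin xmax ymin ymax) :
    decide (c ∈ blocks.flatMap (pvStamp xmin xmax ymin ymax))
      = pvBlockedA blocks c.1 c.2 := by
  rcases (pvMemCells xmin xmax ymin ymax c).mp hc with ⟨hx, hy⟩
  rw [PySem.List.mem_pyRange_iff_of_pos (by norm_num)] at hx hy
  have hiff : (c ∈ blocks.flatMap (pvStamp xmin xmax ymin ymax))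
      ↔ ∃ b ∈ blocks, ((b.1 - 30 ≤ c.1 ∧ c.1 ≤ b.1 + b.2.2.1 + 30)
          ∧ (b.2.1 - 30 ≤ c.2 ∧ c.2 ≤ b.2.1 + b.2.2.2 + 30)) := by
    rw [List.mem_flatMap]
    refine exists_congr fun b => and_congr_right fun _ => ?_
    rw [pvMemStamp, pvAxis _ _ _ _ _ hx.1 hx.2.2, pvAxis _ _ _ _ _ hy.1 hy.2.2]
    constructor
    · rintro ⟨⟨_, h1⟩, ⟨_, h2⟩⟩; exact ⟨h1, h2⟩
    · rintro ⟨h1, h2⟩; exact ⟨⟨by omega, h1⟩, ⟨by omega, h2⟩⟩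
  rw [pvBlockedA_eq_any]
  cases hany : blocks.any (fun b => decide ((b.1 - 30 ≤ c.1 ∧ c.1 ≤ b.1 + b.2.2.1 + 30)
      ∧ (b.2.1 - 30 ≤ c.2 ∧ c.2 ≤ b.2.1 + b.2.2.2 + 30))) with
  | false =>
    simp only [List.any_eq_false, decide_eq_true_eq] at hany
    simp only [decide_eq_false_iff_not, hiff]
    rintro ⟨b, hb, hcond⟩
    exact hany b hb hcond
  | true =>
    simp only [List.any_eq_true, decide_eq_true_eq] at hany
    simp only [decide_eq_true_eq, hiff]
    exact hany

-- the entries of A's dict, cell by cell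
lemma pvItemsA (xmin xmax ymin ymax : Int) (f : Int → Int → Bool) :
    ((PySem.List.pyRange xmin (xmax + 1) 20).foldl (fun occ gx =>
        (PySem.List.pyRange ymin (ymax + 1) 20).foldl (fun occ gy =>
          occ.insert (gx, gy) (f gx gy)) occ) (PySem.Dict.empty : PySem.Dict (Int × Int) Bool)).items
      = (pvCells xmin xmax ymin ymax).map (fun c => (c, f c.1 c.2)) := by
  rw [pvNested _ f _ _ (pvNodupRange _ _) (pvNodupRange _ _) (by intro p hp; simp [PySem.Dict.empty] at hp)]
  unfold pvCells
  simp [List.map_flatMap, List.map_map, Function.comp_def, PySem.Dict.empty]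

-- ===== VERDICT (by name: the statement is the Claim_ definition above) =====
theorem build_grid_occupancy_spec : Claim_equal_build_grid_occupancy := by
  intro blocks xmin xmax ymin ymax _
  unfold Spec_build_grid_occupancy build_grid_occupancy build_grid_occupancy_alt
  have hA := pvItemsA xmin xmax ymin ymax (fun gx gy => pvBlockedA blocks gx gy)
  have hB0 : ((PySem.List.pyRange xmin (xmax + 1) 20).foldl (fun occ gx =>
      (PySem.List.pyRange ymin (ymax + 1) 20).foldl (fun occ gy =>
        occ.insert (gx, gy) false) occ) (PySem.Dict.empty : PySem.Dict (Int × Int) Bool))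
      = PySem.Dict.mk ((pvCells xmin xmax ymin ymax).map (fun c => (c, false))) := by
    apply PySem.Dict.ext
    exact pvItemsA xmin xmax ymin ymax (fun _ _ => false)
  rw [hA, pvStampLoop, hB0,
    pvStampFold _ _ _ (pvStampSubCells blocks xmin xmax ymin ymax)]
  simp only [List.map_map]
  refine List.map_congr_left ?_
  intro c hc
  simp [pvCellEq blocks xmin xmax ymin ymax c hc]
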